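-- pv_equiv track=rewrite | github.com/danielcieslinski/suballoy | find_outliers.py | biggest_outlier
-- ===== SOURCE A (Python) =====
-- def biggest_outlier(defected_data, baseline_data):
--     candidate_index, candidate_val_split = 0, 0
--     for i, D in enumerate(zip(defected_data, baseline_data)):
--         a,b = D
--         x = abs(a-b)
--         if x > candidate_val_split:
--             candidate_val_split = x
--             candidate_index = i
--     return candidate_index, candidate_val_split
-- ===== SOURCE B (Python) =====
-- def biggest_outlier(defected_data, baseline_data):
--     diffs = [abs(a - b) for a, b in zip(defected_data, baseline_data)]
--     if not diffs:
--         return 0, 0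
--     val = max(diffs)
--     return diffs.index(val), val
-- ===== Notes on version B (the rewrite author's own statement) =====
-- stated objective: simpler
-- what changed: Replaces the fused single-pass running-max-with-index loop by a two-pass decomposition: build the list of absolute differences, then take max() and locate its first occurrence with index().
import Mathlib
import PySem

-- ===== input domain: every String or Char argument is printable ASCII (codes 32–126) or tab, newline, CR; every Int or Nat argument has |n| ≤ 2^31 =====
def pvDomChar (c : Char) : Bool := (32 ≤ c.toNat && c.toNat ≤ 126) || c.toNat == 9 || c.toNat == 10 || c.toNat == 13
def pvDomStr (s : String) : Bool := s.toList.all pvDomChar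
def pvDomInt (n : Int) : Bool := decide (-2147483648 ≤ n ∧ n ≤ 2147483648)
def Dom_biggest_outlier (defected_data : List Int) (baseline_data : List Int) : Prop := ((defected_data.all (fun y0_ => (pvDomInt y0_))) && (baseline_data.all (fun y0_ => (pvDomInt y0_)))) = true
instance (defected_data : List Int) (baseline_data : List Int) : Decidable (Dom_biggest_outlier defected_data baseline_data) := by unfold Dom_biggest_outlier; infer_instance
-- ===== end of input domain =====

-- B builds the full diffs table and then uses max()/index() (two passes) instead of A's
-- fused running-max loop; objective: simpler.

-- ===== PORT A =====
def biggest_outlier (defected_data : List Int) (baseline_data : List Int) : Int × Int :=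
  (PySem.List.enumerate (defected_data.zip baseline_data) 0).foldl
    (fun st p =>
      let x := |p.2.1 - p.2.2|
      if st.2 < x then (p.1, x) else st)
    (0, 0)

-- ===== PORT B =====
def biggest_outlier_alt (defected_data : List Int) (baseline_data : List Int) : Int × Int :=
  let diffs := (defected_data.zip baseline_data).map (fun p => |p.1 - p.2|)
  match PySem.List.max? diffs (fun y => y) with
  | none => (0, 0)                                   -- empty diffs
  | some v =>
    match PySem.List.index? diffs v with
    | some k => ((k : Int), v)
    | none => (0, 0)                                 -- unreachable: v ∈ diffs (Python .index cannot raise here)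

-- ===== PRECONDITION & SPEC =====
def Spec_biggest_outlier (defected_data : List Int) (baseline_data : List Int) (out : Int × Int) : Prop := out = biggest_outlier_alt defected_data baseline_data
instance (defected_data : List Int) (baseline_data : List Int) (out : Int × Int) : Decidable (Spec_biggest_outlier defected_data baseline_data out) := by unfold Spec_biggest_outlier; infer_instance

-- ===== CLAIM (what is proved, stated in full; the proofs are below) =====
def Claim_equal_biggest_outlier : Prop := ∀ (defected_data : List Int) (baseline_data : List Int), Dom_biggest_outlier defected_data baseline_data → Spec_biggest_outlier defected_data baseline_data (biggest_outlier defected_data baseline_data)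

-- ===== LEMMAS AND PROOFS =====

-- A's loop, abstracted over the list of absolute differences, with start index n.
def pvGo (n : Int) (st : Int × Int) : List Int → Int × Int
  | [] => st
  | x :: xs => pvGo (n + 1) (if st.2 < x then (n, x) else st) xs

lemma pvFoldA (l : List (Int × Int)) : ∀ (n : Int) (st : Int × Int),
    (PySem.List.enumerate l n).foldl
      (fun st p => let x := |p.2.1 - p.2.2|; if st.2 < x then (p.1, x) else st) st
    = pvGo n st (l.map (fun p => |p.1 - p.2|)) := by
  induction l with
  | nil => intro n st; simp [PySem.List.enumerate_nil, pvGo]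
  | cons h t ih =>
    intro n st
    simp only [PySem.List.enumerate_cons, List.foldl_cons, List.map_cons, pvGo]
    exact ih (n + 1) _

lemma pv_le_foldl_max (cv : Int) (l : List Int) : cv ≤ l.foldl max cv := by
  induction l generalizing cv with
  | nil => simp
  | cons x xs ih => exact le_trans (le_max_left cv x) (ih (max cv x))

-- Characterisation of A's loop: value = running max, index = first position of the max
-- (if it beats the initial cv), as List.idxOf.
lemma pvGo_spec (l : List Int) : ∀ (n ci cv : Int),
    pvGo n (ci, cv) l
    = ((if cv < l.foldl max cv then n + (List.idxOf (l.foldl max cv) l : Int) else ci),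
       l.foldl max cv) := by
  induction l with
  | nil => intro n ci cv; simp [pvGo]
  | cons x xs ih =>
    intro n ci cv
    simp only [pvGo, List.foldl_cons]
    by_cases hx : cv < x
    · rw [max_eq_right hx.le]
      have hM := pv_le_foldl_max x xs
      rw [if_pos hx, ih (n + 1) n x]
      by_cases hxx : x < xs.foldl max x
      · have hne : xs.foldl max x ≠ x := (ne_of_gt hxx)
        rw [if_pos hxx, if_pos (lt_of_lt_of_le hx hM), List.idxOf_cons_ne _ (Ne.symm hne)]
        simp; ring
      · have heq : xs.foldl max x = x := le_antisymm (not_lt.mp hxx) hM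
        rw [if_neg hxx, if_pos (lt_of_lt_of_le hx hM), heq, List.idxOf_cons_self]
        simp
    · rw [max_eq_left (not_lt.mp hx)]
      rw [if_neg hx, ih (n + 1) ci cv]
      by_cases hc : cv < xs.foldl max cv
      · have hne : xs.foldl max cv ≠ x :=
          ne_of_gt (lt_of_le_of_lt (not_lt.mp hx) hc)
        rw [if_pos hc, if_pos hc, List.idxOf_cons_ne _ (Ne.symm hne)]
        simp; ring
      · rw [if_neg hc, if_neg hc]

lemma pv_abs_nonneg_mem (l : List (Int × Int)) :
    ∀ y ∈ l.map (fun p => |p.1 - p.2|), 0 ≤ y := by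
  intro y hy
  rcases List.mem_map.mp hy with ⟨p, _, rfl⟩
  exact abs_nonneg _

-- first position of the running max when all elements are nonneg and the max is 0
lemma pv_all_zero_head (x : Int) (xs : List Int) (h0 : 0 ≤ x)
    (hM : xs.foldl max x = 0) : x = 0 := by
  have := pv_le_foldl_max x xs
  omega

lemma pv_idxOf?_of_mem {v : Int} {l : List Int} (h : v ∈ l) :
    List.idxOf? v l = some (List.idxOf v l) := by
  induction l with
  | nil => cases h
  | cons y t ih =>
    by_cases hy : y = v
    · subst hy; simp [List.idxOf?_cons, List.idxOf_cons_self]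
    · have hvt : v ∈ t := by
        rcases List.mem_cons.mp h with h1 | h1
        · exact absurd h1.symm hy
        · exact h1
      simp [List.idxOf?_cons, hy, List.idxOf_cons_ne _ hy, ih hvt]

lemma pvMain (l : List Int) (hnn : ∀ y ∈ l, 0 ≤ y) :
    pvGo 0 (0, 0) l
    = (match PySem.List.max? l (fun y => y) with
       | none => ((0 : Int), (0 : Int))
       | some v =>
         match PySem.List.index? l v with
         | some k => ((k : Int), v)
         | none => (0, 0)) := by
  cases l with
  | nil => simp [pvGo, PySem.List.max?]
  | cons x xs =>
    have hx0 : 0 ≤ x := hnn x List.mem_cons_self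
    rw [PySem.List.max?_id_cons]
    have hgo := pvGo_spec (x :: xs) 0 0 0
    simp only [List.foldl_cons, max_eq_right hx0] at hgo
    rw [hgo]
    set M := xs.foldl max x with hMdef
    have hxM : x ≤ M := pv_le_foldl_max x xs
    have hMmem : M ∈ x :: xs :=
      PySem.List.max?_mem (xs := x :: xs) (by rw [PySem.List.max?_id_cons])
    have hidx : List.idxOf? M (x :: xs) = some (List.idxOf M (x :: xs)) :=
      pv_idxOf?_of_mem hMmem
    by_cases h0M : (0 : Int) < M
    · simp [hidx, if_pos h0M]
    · have hMz : M = 0 := le_antisymm (not_lt.mp h0M) (le_trans hx0 hxM)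
      have hxz : x = 0 := pv_all_zero_head x xs hx0 (hMdef ▸ hMz)
      rw [if_neg h0M]
      simp [hMz, ← hxz, List.idxOf?_cons]

theorem biggest_outlier_spec : Claim_equal_biggest_outlier := by
  intro d b _
  unfold Spec_biggest_outlier biggest_outlier biggest_outlier_alt
  rw [pvFoldA]
  exact pvMain _ (pv_abs_nonneg_mem _)
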